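-- pv_equiv track=rewrite | github.com/sspeedy99/APS-2020 | CF/solution.py | isRepdigit
-- ===== SOURCE A (Python) =====
-- def isRepdigit(num) :
-- 	prev = -1
-- 	while (num) :
-- 		digit = num % 10
-- 		num //= 10
-- 		if (prev != -1 and digit != prev) :
-- 			return False
-- 		prev = digit
-- 	return True
-- ===== SOURCE B (Python) =====
-- def isRepdigit(num):
--     s = str(num)
--     return all(c == s[0] for c in s)
-- ===== Notes on version B (the rewrite author's own statement) =====
-- stated objective: idiomatic
-- what changed: B works on the decimal string str(num) and checks every character equals the first, instead of A's while-loop extracting digits by % 10 and // 10 with a prev sentinel.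
import Mathlib
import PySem

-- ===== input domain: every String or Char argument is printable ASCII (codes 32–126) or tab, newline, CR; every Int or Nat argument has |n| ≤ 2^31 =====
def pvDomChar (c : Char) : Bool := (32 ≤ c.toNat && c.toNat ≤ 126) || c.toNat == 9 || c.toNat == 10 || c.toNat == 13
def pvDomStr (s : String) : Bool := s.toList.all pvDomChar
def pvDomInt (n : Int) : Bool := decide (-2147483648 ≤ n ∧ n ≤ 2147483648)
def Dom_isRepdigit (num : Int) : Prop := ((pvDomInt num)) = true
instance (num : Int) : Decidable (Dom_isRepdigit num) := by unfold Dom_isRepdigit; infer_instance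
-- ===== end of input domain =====

-- B checks whether every character of the decimal string str(num) equals the first,
-- instead of A's while-loop extracting digits with % 10 and // 10 against a prev sentinel (idiomatic).


-- ===== PORT A =====
-- The Python while-loop. On num = -1 the Python loop never terminates
-- (-1 % 10 = 9, -1 // 10 = -1), so that single state carries a totality guard,
-- unreachable from any input admitted by Pre_isRepdigit.
def isRepdigitLoop (num prev : Int) : Bool :=
  if num = 0 then true
  else if num = -1 then false  -- totality guard: Python diverges in this state; excluded by Pre_
  else
    let digit := PySem.Int.mod num 10
    let num' := PySem.Int.floordiv num 10
    if prev ≠ -1 ∧ digit ≠ prev then false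
    else isRepdigitLoop num' digit
termination_by num.natAbs
decreasing_by
  rw [PySem.Int.floordiv_eq_ediv_of_pos (by norm_num : (0:Int) < 10)]
  omega

def isRepdigit (num : Int) : Bool := isRepdigitLoop num (-1)

-- ===== PORT B =====
-- s = str(num); all(c == s[0] for c in s).  str(num) is never empty, so s[0] is its
-- first character; the [] branch is unreachable.
def isRepdigit_alt (num : Int) : Bool :=
  let cs := PySem.Int.toChars num
  match cs with
  | [] => true
  | c0 :: _ => cs.all (fun c => c == c0)

-- ===== PRECONDITION & SPEC =====
-- Pre_ excludes only num = -1, the one input on which the Python A never returns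
-- (its loop state repeats forever), so A has no value to match there.
def Pre_isRepdigit (num : Int) : Prop := num ≠ -1
instance (num : Int) : Decidable (Pre_isRepdigit num) := by unfold Pre_isRepdigit; infer_instance
def pvWitness_isRepdigit : Int := (7)

def Spec_isRepdigit (num : Int) (out : Bool) : Prop := out = isRepdigit_alt num
instance (num : Int) (out : Bool) : Decidable (Spec_isRepdigit num out) := by unfold Spec_isRepdigit; infer_instance

-- ===== CLAIM (what is proved, stated in full; the proofs are below) =====
def Claim_equal_isRepdigit : Prop := ∀ (num : Int), Dom_isRepdigit num → Pre_isRepdigit num → Spec_isRepdigit num (isRepdigit num)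

-- ===== LEMMAS AND PROOFS =====

lemma toDigitsCore_acc10 (f : Nat) : ∀ (n : Nat) (acc : List Char),
    Nat.toDigitsCore 10 f n acc = Nat.toDigitsCore 10 f n [] ++ acc := by
  induction f with
  | zero => intro n acc; simp [Nat.toDigitsCore]
  | succ f ih =>
    intro n acc
    rw [Nat.toDigitsCore]; conv_rhs => rw [Nat.toDigitsCore]
    by_cases h : n / 10 = 0
    · simp [h]
    · simp only [h, if_false]
      rw [ih (n / 10) ((n % 10).digitChar :: acc), ih (n / 10) [(n % 10).digitChar]]
      simp

lemma toDigitsCore_fuel10 (f : Nat) : ∀ (g n : Nat) (acc : List Char), n < f → n < g →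
    Nat.toDigitsCore 10 f n acc = Nat.toDigitsCore 10 g n acc := by
  induction f with
  | zero => intro g n acc h; omega
  | succ f ih =>
    intro g n acc hf hg
    obtain ⟨g', rfl⟩ : ∃ g', g = g' + 1 := ⟨g - 1, by omega⟩
    rw [Nat.toDigitsCore]; conv_rhs => rw [Nat.toDigitsCore]
    by_cases h : n / 10 = 0
    · simp [h]
    · simp only [h, if_false]
      exact ih g' (n / 10) _ (by omega) (by omega)

lemma toDigits_small (n : Nat) (h : n < 10) :
    Nat.toDigits 10 n = [Nat.digitChar n] := by
  rw [Nat.toDigits, Nat.toDigitsCore]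
  simp [Nat.div_eq_of_lt h, Nat.mod_eq_of_lt h]

lemma toDigits_step (n : Nat) (h : 10 ≤ n) :
    Nat.toDigits 10 n = Nat.toDigits 10 (n / 10) ++ [Nat.digitChar (n % 10)] := by
  rw [Nat.toDigits, Nat.toDigitsCore]
  have h10 : n / 10 ≠ 0 := by omega
  simp only [h10, if_false]
  rw [toDigitsCore_acc10, toDigitsCore_fuel10 n (n / 10 + 1) (n / 10) [] (by omega) (by omega)]
  rfl

lemma digitChar_beq (n d : Nat) (hn : n < 10) (hd : d < 10) :
    (Nat.digitChar n == Nat.digitChar d) = decide (n = d) := by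
  interval_cases n <;> interval_cases d <;> decide

-- The loop with a real digit d as prev computes "every decimal digit of n equals d".
lemma loop_all_digits (n : Nat) (hn : 0 < n) (d : Nat) (hd : d < 10) :
    isRepdigitLoop (n : Int) (d : Int) =
      (Nat.toDigits 10 n).all (fun c => c == Nat.digitChar d) := by
  induction n using Nat.strong_induction_on with
  | _ n ih =>
    rw [isRepdigitLoop]
    have h0 : ¬ ((n : Int) = 0) := by exact_mod_cast hn.ne'
    have hneg : ¬ ((n : Int) < 0) := by omega
    simp only [h0, if_false]
    have hmod : PySem.Int.mod (n : Int) 10 = ((n % 10 : Nat) : Int) :=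
      PySem.Int.mod_natCast n 10
    have hdiv : PySem.Int.floordiv (n : Int) 10 = ((n / 10 : Nat) : Int) :=
      PySem.Int.floordiv_natCast n 10
    have hprev : ((d : Int) ≠ -1) := by omega
    rw [hmod, hdiv]
    by_cases hnd : n % 10 = d
    · have hcond : ¬ (((d : Int) ≠ -1) ∧ ((n % 10 : Nat) : Int) ≠ (d : Int)) := by
        simp [hnd]
      simp only [hcond, if_false]
      by_cases hsmall : n < 10
      · have hnd' : n = d := by omega
        rw [Nat.div_eq_of_lt hsmall, Nat.mod_eq_of_lt hsmall, toDigits_small n hsmall]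
        rw [show ((0 : Nat) : Int) = (0 : Int) from rfl, isRepdigitLoop]
        simp [hnd']
      · have h1 : 0 < n / 10 := by omega
        have h2 : n / 10 < n := by omega
        rw [hnd, ih (n / 10) h2 h1]
        rw [toDigits_step n (by omega)]
        simp [List.all_append, hnd]
    · have hcond : (((d : Int) ≠ -1) ∧ ((n % 10 : Nat) : Int) ≠ (d : Int)) := by
        constructor
        · exact hprev
        · intro h; exact hnd (by exact_mod_cast h)
      rw [if_pos hcond]
      by_cases hsmall : n < 10
      · have hmn : n % 10 = n := Nat.mod_eq_of_lt hsmall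
        rw [toDigits_small n hsmall]
        simp [digitChar_beq n d hsmall hd]
        omega
      · rw [toDigits_step n (by omega)]
        simp [List.all_append, digitChar_beq (n % 10) d (by omega) hd]
        intro _; omega

-- "all equal to the first" = "all (of the prefix) equal to the last", the shape bridging B and A.
lemma all_eq_head_append (t : List Char) (h e : Char) :
    ((h :: t) ++ [e]).all (fun c => c == h) = (h :: t).all (fun c => c == e) := by
  by_cases he : e = h
  · subst he; simp [List.all_append, Bool.and_comm]
  · have h1 : (e == h) = false := by simp [he]
    have h2 : (h == e) = false := by
      simp only [beq_eq_false_iff_ne, ne_eq]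
      exact fun hc => he hc.symm
    simp [List.all_append, h1, h2]

lemma digitChar_ne_dash (m : Nat) (h : m < 10) : Nat.digitChar m ≠ '-' := by
  interval_cases m <;> decide

-- B on a negative number: str(num) starts with '-' followed by at least one digit
-- character, so "all characters equal the first" is false.
lemma alt_neg (num : Int) (h : num < 0) : isRepdigit_alt num = false := by
  unfold isRepdigit_alt
  rw [PySem.Int.toChars]
  simp only [if_pos h]
  by_cases hs : num.natAbs < 10
  · rw [toDigits_small _ hs]
    simp [digitChar_ne_dash _ hs]
  · rw [toDigits_step _ (by omega)]
    simp [List.all_append]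
    intro _ h2
    exact absurd h2 (digitChar_ne_dash (num.natAbs % 10) (by omega))

-- A on a negative number other than -1: the loop always hits a digit mismatch or the
-- (unreachable-from-inputs) -1 state before num can become 0, so it returns False.
lemma loop_neg : ∀ (k : Nat) (num : Int), num.natAbs ≤ k → num < 0 →
    ∀ prev : Int, isRepdigitLoop num prev = false := by
  intro k
  induction k with
  | zero => intro num h hneg prev; omega
  | succ k ih =>
    intro num h hneg prev
    rw [isRepdigitLoop]
    have h0 : ¬ (num = 0) := by omega
    by_cases h1 : num = -1
    · simp [h1]
    · simp only [h0, if_false, h1]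
      by_cases hm : prev ≠ -1 ∧ PySem.Int.mod num 10 ≠ prev
      · rw [if_pos hm]
      · rw [if_neg hm]
        apply ih
        · rw [PySem.Int.floordiv_eq_ediv_of_pos (by norm_num : (0:Int) < 10)]; omega
        · rw [PySem.Int.floordiv_eq_ediv_of_pos (by norm_num : (0:Int) < 10)]; omega

theorem isRepdigit_equal (num : Int) (hpre : num ≠ -1) :
    isRepdigit num = isRepdigit_alt num := by
  by_cases hneg : num < 0
  · unfold isRepdigit
    rw [loop_neg num.natAbs num le_rfl hneg, alt_neg num hneg]
  · have hpos : 0 ≤ num := by omega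
    unfold isRepdigit isRepdigit_alt
    obtain ⟨n, rfl⟩ : ∃ n : Nat, num = (n : Int) := ⟨num.toNat, (Int.toNat_of_nonneg hpos).symm⟩
    by_cases hz : n = 0
    · subst hz
      simp only [Nat.cast_zero]
      rw [isRepdigitLoop]
      decide
    · have hn : 0 < n := Nat.pos_of_ne_zero hz
      have hchars : PySem.Int.toChars (n : Int) = Nat.toDigits 10 n := by
        rw [PySem.Int.toChars]
        have : ¬ ((n : Int) < 0) := by omega
        simp [this]
      rw [isRepdigitLoop]
      have h0 : ¬ ((n : Int) = 0) := by exact_mod_cast hn.ne'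
      have hneg : ¬ ((n : Int) < 0) := by omega
      simp only [h0, if_false]
      have hcond : ¬ ((-1 : Int) ≠ -1 ∧ PySem.Int.mod (n : Int) 10 ≠ -1) := by simp
      simp only [hcond, if_false]
      have hmod : PySem.Int.mod (n : Int) 10 = ((n % 10 : Nat) : Int) :=
        PySem.Int.mod_natCast n 10
      have hdiv : PySem.Int.floordiv (n : Int) 10 = ((n / 10 : Nat) : Int) :=
        PySem.Int.floordiv_natCast n 10
      rw [hmod, hdiv, hchars]
      by_cases hsmall : n < 10
      · have hdivz : n / 10 = 0 := Nat.div_eq_of_lt hsmall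
        rw [hdivz, toDigits_small n hsmall]
        rw [Nat.mod_eq_of_lt hsmall]
        rw [show ((0 : Nat) : Int) = (0 : Int) by rfl, isRepdigitLoop]
        simp
      · have h1 : 0 < n / 10 := by omega
        rw [loop_all_digits (n / 10) h1 (n % 10) (by omega)]
        rw [toDigits_step n (by omega)]
        rcases hp : Nat.toDigits 10 (n / 10) with _ | ⟨h, t⟩
        · simp
        · exact (all_eq_head_append t h (Nat.digitChar (n % 10))).symm

-- ===== VERDICT (by name: the statement is the Claim_ definition above) =====
theorem isRepdigit_spec : Claim_equal_isRepdigit := by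
  intro num _ hpre
  unfold Spec_isRepdigit
  exact isRepdigit_equal num hpre
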